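-- pv_equiv track=rewrite | github.com/Senzo13/JoyBoy | core/cyberatlas/scoring.py | _confidence_label
-- ===== SOURCE A (Python) =====
-- from typing import Any, Dict, List, Tuple
--
-- CONFIDENCE_ORDER = {
--     "Confirmed": 4,
--     "Strong signal": 3,
--     "Estimated": 2,
--     "Unknown": 1,
-- }
--
-- def _confidence_label(findings: List[Dict[str, Any]]) -> str:
--     if not findings:
--         return "Unknown"
--     best = max((CONFIDENCE_ORDER.get(item.get("confidence", "Unknown"), 1) for item in findings), default=1)
--     for label, rank in CONFIDENCE_ORDER.items():
--         if rank == best: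
--             return label
--     return "Unknown"
-- ===== SOURCE B (Python) =====
-- from typing import Any, Dict, List
--
-- CONFIDENCE_ORDER = {
--     "Confirmed": 4,
--     "Strong signal": 3,
--     "Estimated": 2,
--     "Unknown": 1,
-- }
--
-- def _confidence_label(findings: List[Dict[str, Any]]) -> str:
--     present = {item.get("confidence", "Unknown") for item in findings}
--     for label in CONFIDENCE_ORDER:
--         if label in present:
--             return label
--     return "Unknown"
-- ===== Notes on version B (the rewrite author's own statement) =====
-- stated objective: idiomatic
-- what changed: B replaces A's numeric max over ranks plus reverse lookup of the label with that rank by collecting the set of confidence strings present and returning the first label of the priority-ordered CONFIDENCE_ORDER found in that set.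
import Mathlib
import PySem

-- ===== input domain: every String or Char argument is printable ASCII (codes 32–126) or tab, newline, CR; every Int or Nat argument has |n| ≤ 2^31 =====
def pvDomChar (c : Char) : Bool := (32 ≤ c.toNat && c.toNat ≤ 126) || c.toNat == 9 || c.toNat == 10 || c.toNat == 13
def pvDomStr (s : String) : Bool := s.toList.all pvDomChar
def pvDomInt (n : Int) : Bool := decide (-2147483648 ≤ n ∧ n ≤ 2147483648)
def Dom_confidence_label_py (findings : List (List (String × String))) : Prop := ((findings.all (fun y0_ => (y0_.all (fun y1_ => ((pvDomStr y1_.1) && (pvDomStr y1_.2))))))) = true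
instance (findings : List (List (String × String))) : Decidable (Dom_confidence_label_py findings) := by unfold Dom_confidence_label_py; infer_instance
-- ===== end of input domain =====

-- B drops A's numeric max over ranks and the rank-equality reverse lookup: it collects the
-- set of confidence strings present and returns the first priority-ordered label present.

-- ===== PORT A =====
-- module constant CONFIDENCE_ORDER (a dict, insertion order = priority descending)
def pvCONFIDENCE_ORDER : PySem.Dict String Int :=
  PySem.Dict.mk [("Confirmed", 4), ("Strong signal", 3), ("Estimated", 2), ("Unknown", 1)]

-- item.get("confidence", "Unknown")
def pvConf (item : List (String × String)) : String :=
  PySem.Dict.getD (PySem.Dict.mk item) "confidence" "Unknown"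

def confidence_label_py (findings : List (List (String × String))) : String :=
  if findings = [] then "Unknown"
  else
    -- best = max((CONFIDENCE_ORDER.get(item.get("confidence","Unknown"), 1) for item in findings), default=1)
    let best : Int := PySem.List.maxD
      (findings.map (fun item => PySem.Dict.getD pvCONFIDENCE_ORDER (pvConf item) 1)) (fun r => r) 1
    -- for label, rank in CONFIDENCE_ORDER.items(): if rank == best: return label
    match pvCONFIDENCE_ORDER.items.find? (fun p => p.2 == best) with
    | some p => p.1
    | none => "Unknown"

-- ===== PORT B =====
def confidence_label_py_alt (findings : List (List (String × String))) : String :=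
  -- present = {item.get("confidence", "Unknown") for item in findings}
  let present : PySem.Set String := PySem.Set.ofList (findings.map (fun item => pvConf item))
  -- for label in CONFIDENCE_ORDER: if label in present: return label
  match (PySem.Dict.keys pvCONFIDENCE_ORDER).find? (fun label => PySem.Set.contains present label) with
  | some label => label
  | none => "Unknown"

-- ===== PRECONDITION & SPEC =====
def Spec_confidence_label_py (findings : List (List (String × String))) (out : String) : Prop := out = confidence_label_py_alt findings
instance (findings : List (List (String × String))) (out : String) : Decidable (Spec_confidence_label_py findings out) := by unfold Spec_confidence_label_py; infer_instance

-- ===== CLAIM (what is proved, stated in full; the proofs are below) =====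
def Claim_equal_confidence_label_py : Prop := ∀ (findings : List (List (String × String))), Dom_confidence_label_py findings → Spec_confidence_label_py findings (confidence_label_py findings)

-- ===== LEMMAS AND PROOFS =====

-- rank of a confidence string under CONFIDENCE_ORDER (with default 1)
def pvRank (s : String) : Int := PySem.Dict.getD pvCONFIDENCE_ORDER s 1

-- highest rank present in a list of confidence strings
def pvM (cs : List String) : Int :=
  if "Confirmed" ∈ cs then 4 else if "Strong signal" ∈ cs then 3 else if "Estimated" ∈ cs then 2 else 1

-- A's reverse lookup of the label for a rank
def pvPick (best : Int) : String :=
  match pvCONFIDENCE_ORDER.items.find? (fun p => p.2 == best) with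
  | some p => p.1
  | none => "Unknown"

-- B's first-present-label choice, as an if-chain over memberships
def pvChoose (cs : List String) : String :=
  if "Confirmed" ∈ cs then "Confirmed" else if "Strong signal" ∈ cs then "Strong signal"
  else if "Estimated" ∈ cs then "Estimated" else "Unknown"

lemma pvRank_eq (s : String) : pvRank s =
    if "Confirmed" = s then 4 else if "Strong signal" = s then 3 else if "Estimated" = s then 2 else 1 := by
  simp only [pvRank, pvCONFIDENCE_ORDER, PySem.Dict.getD_eq_get?_getD, PySem.Dict.get?_mk_cons,
    beq_iff_eq]
  split_ifs <;> rfl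

lemma pvM_cons (c : String) (cs : List String) : pvM (c :: cs) = max (pvRank c) (pvM cs) := by
  rw [pvRank_eq]
  by_cases h1 : "Confirmed" = c <;> by_cases h2 : "Strong signal" = c <;> by_cases h3 : "Estimated" = c <;>
  by_cases m1 : "Confirmed" ∈ cs <;> by_cases m2 : "Strong signal" ∈ cs <;> by_cases m3 : "Estimated" ∈ cs <;>
    simp_all [pvM]

lemma foldl_rank (cs : List String) (a : Int) (ha : 1 ≤ a) :
    (cs.map pvRank).foldl max a = max a (pvM cs) := by
  induction cs generalizing a with
  | nil => simpa [pvM] using ha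
  | cons c cs ih =>
    simp only [List.map_cons, List.foldl_cons]
    rw [ih (max a (pvRank c)) (le_trans ha (le_max_left _ _)), pvM_cons, max_assoc]

lemma pvRank_ge_one (s : String) : 1 ≤ pvRank s := by
  rw [pvRank_eq]; split_ifs <;> omega

lemma A_cons (x : List (String × String)) (t : List (List (String × String))) :
    confidence_label_py (x :: t) = pvPick (pvM ((x :: t).map pvConf)) := by
  unfold confidence_label_py pvPick
  rw [if_neg (by simp : ¬(x :: t = ([] : List (List (String × String)))))]
  have h1 : (x :: t).map (fun item => PySem.Dict.getD pvCONFIDENCE_ORDER (pvConf item) 1)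
      = ((x :: t).map pvConf).map pvRank := by
    rw [List.map_map]; rfl
  rw [h1]
  have h2 : PySem.List.maxD (((x :: t).map pvConf).map pvRank) (fun r => r) 1
      = pvM ((x :: t).map pvConf) := by
    simp only [List.map_cons]
    rw [show PySem.List.maxD (pvRank (pvConf x) :: (t.map pvConf).map pvRank) (fun r => r) 1
        = ((t.map pvConf).map pvRank).foldl max (pvRank (pvConf x)) from by
      simp [PySem.List.maxD, PySem.List.max?_id_cons]]
    rw [foldl_rank _ _ (pvRank_ge_one _), ← pvM_cons, ← List.map_cons]
  rw [h2]

lemma contains_ofList_eq (cs : List String) (l : String) :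
    PySem.Set.contains (PySem.Set.ofList cs) l = decide (l ∈ cs) := by
  by_cases h : l ∈ cs
  · simp [h, PySem.Set.mem_ofList]
  · simp only [h, decide_false]
    rw [← Bool.not_eq_true]
    simp [PySem.Set.mem_ofList, h]

lemma B_eq (findings : List (List (String × String))) :
    confidence_label_py_alt findings = pvChoose (findings.map pvConf) := by
  unfold confidence_label_py_alt pvChoose
  simp only [show PySem.Dict.keys pvCONFIDENCE_ORDER = ["Confirmed", "Strong signal", "Estimated", "Unknown"] from rfl,
    List.find?, contains_ofList_eq]
  by_cases m1 : "Confirmed" ∈ findings.map pvConf <;>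
  by_cases m2 : "Strong signal" ∈ findings.map pvConf <;>
  by_cases m3 : "Estimated" ∈ findings.map pvConf <;>
  by_cases m4 : "Unknown" ∈ findings.map pvConf <;>
    simp [m1, m2, m3, m4]

lemma pick_eq_choose (cs : List String) : pvPick (pvM cs) = pvChoose cs := by
  unfold pvPick pvChoose pvM
  split_ifs <;> rfl

-- ===== VERDICT (by name: the statement is the Claim_ definition above) =====
theorem confidence_label_py_spec : Claim_equal_confidence_label_py := by
  intro findings _
  unfold Spec_confidence_label_py
  cases findings with
  | nil => rfl
  | cons x t => rw [A_cons, B_eq]; exact pick_eq_choose _
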